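-- pv_equiv track=rewrite | github.com/ctc316/algorithm-python | Lintcode/Ladder_all_A_OA/1639. K-Substring with K different characters.py | KSubstring
-- ===== SOURCE A (Python) =====
-- def KSubstring(stringIn, K):
--     ch_cnt = {}
--     diff_chs = 0
--     records = set()
--     for i in range(len(stringIn)):
--         if stringIn[i] not in ch_cnt:
--             ch_cnt[stringIn[i]] = 1
--         else:
--             ch_cnt[stringIn[i]] += 1
--         if ch_cnt[stringIn[i]] == 1:
--             diff_chs += 1
--
--         if i >= K:
--             ch_cnt[stringIn[i - K]] -= 1
--             if ch_cnt[stringIn[i - K]] == 0: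
--                 diff_chs -= 1
--
--         if i >= K - 1 and diff_chs == K:
--             records.add(stringIn[i - K: i + 1])
--
--     return len(records)
-- ===== SOURCE B (Python) =====
-- def KSubstring(stringIn, K):
--     records = set()
--     last = {}
--     start_min = 0
--     for i, ch in enumerate(stringIn):
--         if ch in last and last[ch] + 1 > start_min:
--             start_min = last[ch] + 1
--         last[ch] = i
--         if i >= K - 1 and start_min <= i - K + 1:
--             records.add(stringIn[i - K:i + 1])
--     return len(records)
-- ===== Notes on version B (the rewrite author's own statement) =====
-- stated objective: alternative
-- what changed: Replaced A's char-count dict with decrement-on-slide and a running distinct-character counter by a last-occurrence index map plus a monotone minimal repeat-free window start: one dict write per character and an integer comparison decide whether a window qualifies, instead of two dict updates and counter bookkeeping per step; Pre_ excludes only K < 0 on non-empty strings, where A raises IndexError on stringIn[i - K].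
import Mathlib
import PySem

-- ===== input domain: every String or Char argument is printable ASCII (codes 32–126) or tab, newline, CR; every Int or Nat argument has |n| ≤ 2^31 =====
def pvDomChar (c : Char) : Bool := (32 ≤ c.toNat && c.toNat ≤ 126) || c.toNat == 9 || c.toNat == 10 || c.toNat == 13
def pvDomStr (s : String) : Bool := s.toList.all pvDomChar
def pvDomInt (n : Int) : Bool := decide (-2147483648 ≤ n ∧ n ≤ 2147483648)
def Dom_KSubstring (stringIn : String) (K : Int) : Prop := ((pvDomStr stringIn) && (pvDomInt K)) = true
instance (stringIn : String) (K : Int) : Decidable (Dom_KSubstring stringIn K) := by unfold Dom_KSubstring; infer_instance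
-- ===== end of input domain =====

-- B replaces A's incremental char-count dict + running distinct-counter sliding window by
-- the last-occurrence map + monotone minimal repeat-free window start; objective: a genuinely
-- different window-maintenance algorithm with the same cost.

-- ===== PORT A =====
-- loop over the index list; state = (ch_cnt, diff_chs, records); none = exception path
-- (IndexError on stringIn[i - K] / KeyError on ch_cnt[stringIn[i - K]]), excluded by Pre_.
def KSubstringLoopA (s : List Char) (K : Int) :
    List Int → PySem.Dict Char Int × Int × PySem.Set (List Char) →
    Option (PySem.Dict Char Int × Int × PySem.Set (List Char))
  | [], st => some st
  | i :: rest, (cnt, diff, recs) =>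
    match PySem.List.pyGet? s i with
    | none => none
    | some c =>
      let cnt1 := if cnt.contains c then cnt.modify c 0 (· + 1) else cnt.insert c 1
      let diff1 := if cnt1.getD c 0 = 1 then diff + 1 else diff
      match (if K ≤ i then
               match PySem.List.pyGet? s (i - K) with
               | none => none
               | some c2 =>
                 match cnt1.get? c2 with
                 | none => none
                 | some v => some (cnt1.insert c2 (v - 1), if v - 1 = 0 then diff1 - 1 else diff1)
             else some (cnt1, diff1)) with
      | none => none
      | some (cnt2, diff2) =>
        KSubstringLoopA s K rest
          (cnt2, diff2,
            if K - 1 ≤ i ∧ diff2 = K then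
              PySem.Set.add recs (PySem.List.slice s (some (i - K)) (some (i + 1)))
            else recs)

def KSubstring (stringIn : String) (K : Int) : Int :=
  match KSubstringLoopA stringIn.toList K (PySem.List.pyRange 0 (PySem.Str.len stringIn))
      (PySem.Dict.empty, 0, PySem.Set.empty) with
  | some (_, _, recs) => PySem.Set.len recs
  | none => 0   -- unreachable under Pre_ (A raises there)

-- ===== PORT B =====
-- loop over enumerate(stringIn); state = (last, start_min, records)
def KSubstringLoopB (s : List Char) (K : Int) :
    List (Int × Char) → PySem.Dict Char Int × Int × PySem.Set (List Char) →
    PySem.Dict Char Int × Int × PySem.Set (List Char)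
  | [], st => st
  | (i, ch) :: rest, (last, sm, recs) =>
    let sm1 := match last.get? ch with
      | some v => if v + 1 > sm then v + 1 else sm
      | none => sm
    let last1 := last.insert ch i
    let recs1 := if K - 1 ≤ i ∧ sm1 ≤ i - K + 1 then
        PySem.Set.add recs (PySem.List.slice s (some (i - K)) (some (i + 1)))
      else recs
    KSubstringLoopB s K rest (last1, sm1, recs1)

def KSubstring_alt (stringIn : String) (K : Int) : Int :=
  PySem.Set.len
    ((KSubstringLoopB stringIn.toList K (PySem.List.enumerate stringIn.toList)
      (PySem.Dict.empty, 0, PySem.Set.empty)).2.2)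

-- ===== PRECONDITION & SPEC =====
-- Pre_ excludes exactly the inputs where A raises: K < 0 on a non-empty string makes
-- ch_cnt[stringIn[i-K]] hit a missing key (KeyError) or stringIn[i-K] an out-of-range
-- index (IndexError) before the loop can finish.
def Pre_KSubstring (stringIn : String) (K : Int) : Prop := 0 ≤ K ∨ stringIn.toList = []
instance (stringIn : String) (K : Int) : Decidable (Pre_KSubstring stringIn K) := by
  unfold Pre_KSubstring; infer_instance
def pvWitness_KSubstring : String × Int := ("abcab", 2)

def Spec_KSubstring (stringIn : String) (K : Int) (out : Int) : Prop := out = KSubstring_alt stringIn K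
instance (stringIn : String) (K : Int) (out : Int) : Decidable (Spec_KSubstring stringIn K out) := by unfold Spec_KSubstring; infer_instance

-- ===== CLAIM (what is proved, stated in full; the proofs are below) =====
def Claim_equal_KSubstring : Prop := ∀ (stringIn : String) (K : Int), Dom_KSubstring stringIn K → Pre_KSubstring stringIn K → Spec_KSubstring stringIn K (KSubstring stringIn K)

-- ===== LEMMAS AND PROOFS =====

-- A-side characterisation step: what one iteration of A's loop contributes to the
-- record set, read off at the window's END index i (proved in pvLoopA_eq below).
def recStepA (s : List Char) (K : Int)
    (recs : PySem.Set (List Char)) (i : Int) : PySem.Set (List Char) :=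
  if PySem.Set.len (PySem.Set.ofList (PySem.List.slice s (some (i - K + 1)) (some (i + 1)))) = K then
    PySem.Set.add recs (PySem.List.slice s (some (i - K)) (some (i + 1)))
  else recs

-- number of distinct elements of a PySem set built from a list = Finset cardinality
lemma pvSetLen_eq_card (l : List Char) :
    PySem.Set.len (PySem.Set.ofList l) = (l.toFinset.card : Int) := by
  have hnd := PySem.Set.nodup_ofList (α := Char) l
  have hfs : (PySem.Set.ofList l).toFinset = l.toFinset := by
    ext x; simp [List.mem_toFinset, PySem.Set.mem_ofList]
  simp [PySem.Set.len, ← List.toFinset_card_of_nodup hnd, hfs]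

lemma pvCard_cons (c : Char) (w : List Char) :
    (c :: w).toFinset.card = w.toFinset.card + (if c ∈ w then 0 else 1) := by
  rw [List.toFinset_cons]
  by_cases h : c ∈ w
  · rw [Finset.insert_eq_self.mpr (List.mem_toFinset.mpr h), if_pos h]; omega
  · rw [Finset.card_insert_of_notMem (fun hx => h (List.mem_toFinset.mp hx)), if_neg h]

lemma pvCard_append_singleton (w : List Char) (c : Char) :
    (w ++ [c]).toFinset.card = w.toFinset.card + (if c ∈ w then 0 else 1) := by
  have hfs : (w ++ [c]).toFinset = (c :: w).toFinset := by
    ext x; simp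
  rw [hfs, pvCard_cons]

-- main loop invariant: A's loop from index j onwards, with ch_cnt counting the current
-- window (s.take j).drop (j - K') and diff_chs its number of distinct characters,
-- produces exactly the recStepA fold over the remaining indices ≥ max (K-1) j.
lemma pvLoopA_eq (s : List Char) (K' : Nat) :
    ∀ (d j : Nat), s.length - j = d → j ≤ s.length →
    ∀ (cnt : PySem.Dict Char Int) (diff : Int) (recs : PySem.Set (List Char)),
    (∀ ch : Char, cnt.getD ch 0 = (((s.take j).drop (j - K')).count ch : Int)) →
    diff = (((s.take j).drop (j - K')).toFinset.card : Int) →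
    ∃ cnt' diff',
      KSubstringLoopA s (K' : Int) (PySem.List.pyRange (j : Int) (s.length : Int)) (cnt, diff, recs)
        = some (cnt', diff',
            (PySem.List.pyRange (max ((K' : Int) - 1) (j : Int)) (s.length : Int)).foldl
              (recStepA s (K' : Int)) recs) := by
  intro d
  induction d with
  | zero =>
    intro j hd hj cnt diff recs hcnt hdiff
    have hjn : j = s.length := by omega
    subst hjn
    rw [PySem.List.pyRange_one_eq_nil le_rfl,
      PySem.List.pyRange_one_eq_nil (le_max_right _ _)]
    exact ⟨cnt, diff, by simp [KSubstringLoopA]⟩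
  | succ e ih =>
    intro j hd hj cnt diff recs hcnt hdiff
    have hjn : j < s.length := by omega
    have hjn' : ((j : Int)) < (s.length : Int) := by exact_mod_cast hjn
    set c := s[j] with hc
    have hget : PySem.List.pyGet? s (j : Int) = some c := by
      simp [PySem.List.pyGet?_natCast, List.getElem?_eq_getElem hjn, hc]
    set w := (s.take j).drop (j - K') with hw
    set w' := (s.take (j + 1)).drop (j + 1 - K') with hw'
    have hmid : (s.take (j + 1)).drop (j - K') = w ++ [c] := by
      rw [List.take_add_one, List.getElem?_eq_getElem hjn]
      rw [List.drop_append_of_le_length (by simp; omega)]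
      simp [hw, hc]
    -- after adding s[j]
    have hcount_app : ∀ ch : Char, (w ++ [c]).count ch = w.count ch + (if ch = c then 1 else 0) := by
      intro ch
      by_cases h : ch = c
      · subst h; simp [List.count_append]
      · simp [List.count_append, h, Ne.symm h]
    have hcnt1 : ∀ ch : Char,
        (if cnt.contains c then cnt.modify c 0 (· + 1) else cnt.insert c 1).getD ch 0
          = ((w ++ [c]).count ch : Int) := by
      intro ch
      by_cases hcont : cnt.contains c
      · rw [if_pos hcont, PySem.Dict.getD_modify, hcount_app ch, hcnt ch, hcnt c]
        by_cases h : ch = c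
        · subst h; rw [if_pos rfl, if_pos rfl]; push_cast; ring
        · rw [if_neg h, if_neg h]; push_cast; ring
      · rw [if_neg hcont, PySem.Dict.getD_insert, hcount_app ch, hcnt ch]
        by_cases h : ch = c
        · have h0 : cnt.getD c 0 = 0 := PySem.Dict.getD_of_not_contains _ _ (by simpa using hcont)
          have h1 : (w.count c : Int) = 0 := by rw [← hcnt c, h0]
          subst h
          rw [if_pos rfl, if_pos rfl]
          omega
        · rw [if_neg h, if_neg h]; push_cast; ring
    set cnt1 := if cnt.contains c then cnt.modify c 0 (· + 1) else cnt.insert c 1 with hcnt1def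
    have hdiff1 : (if cnt1.getD c 0 = 1 then diff + 1 else diff)
        = (((w ++ [c]).toFinset.card : Nat) : Int) := by
      have hcc : cnt1.getD c 0 = (w.count c : Int) + 1 := by
        rw [hcnt1 c]; simp [List.count_append]
      rw [pvCard_append_singleton, hdiff]
      by_cases hmem : c ∈ w
      · have : cnt1.getD c 0 ≠ 1 := by
          rw [hcc]
          have := List.count_pos_iff.mpr hmem
          omega
        simp [this, hmem]
      · have : cnt1.getD c 0 = 1 := by
          rw [hcc, List.count_eq_zero.mpr hmem]; simp
        simp [this, hmem]
    set diff1 := if cnt1.getD c 0 = 1 then diff + 1 else diff with hdiff1def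
    -- one unfolding of A's loop
    rw [PySem.List.pyRange_one_cons hjn']
    by_cases hK : (K' : Int) ≤ (j : Int)
    · -- removal branch: i ≥ K
      have hKj : K' ≤ j := by exact_mod_cast hK
      have hjKn : j - K' < s.length := by omega
      set c2 := s[j - K'] with hc2
      have hgetr : PySem.List.pyGet? s ((j : Int) - (K' : Int)) = some c2 := by
        have hcast : (j : Int) - (K' : Int) = ((j - K' : Nat) : Int) := by omega
        rw [hcast]
        simp [PySem.List.pyGet?_natCast, List.getElem?_eq_getElem hjKn, hc2]
      have hconsmid : w ++ [c] = c2 :: w' := by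
        rw [← hmid, hw']
        have hlt : j - K' < (s.take (j + 1)).length := by simp; omega
        rw [List.drop_eq_getElem_cons hlt]
        congr 1
        · rw [List.getElem_take]
        · congr 1; omega
      have hc2mem : c2 ∈ w ++ [c] := by rw [hconsmid]; exact List.mem_cons_self
      have hvex : ∃ v : Int, cnt1.get? c2 = some v := by
        cases hv : cnt1.get? c2 with
        | some v => exact ⟨v, rfl⟩
        | none =>
          exfalso
          have h0 : cnt1.getD c2 0 = 0 := by
            rw [PySem.Dict.getD_eq_get?_getD, hv]; rfl
          rw [hcnt1 c2] at h0
          have := List.count_pos_iff.mpr hc2mem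
          omega
      obtain ⟨v, hv⟩ := hvex
      have hvval : v = ((w ++ [c]).count c2 : Int) := by
        have := hcnt1 c2
        rw [PySem.Dict.getD_eq_get?_getD, hv] at this
        simpa using this
      have hvw' : v - 1 = (w'.count c2 : Int) := by
        rw [hvval, hconsmid]
        simp
      -- counts after removal
      have hcnt2 : ∀ ch : Char, (cnt1.insert c2 (v - 1)).getD ch 0 = (w'.count ch : Int) := by
        intro ch
        rw [PySem.Dict.getD_insert]
        rcases eq_or_ne ch c2 with h | h
        · subst h; rw [if_pos rfl]; exact hvw'
        · rw [if_neg h, hcnt1 ch, hconsmid]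
          have hcc : (c2 :: w').count ch = w'.count ch := by
            simp [Ne.symm h]
          rw [hcc]
      have hdiff2 : (if v - 1 = 0 then diff1 - 1 else diff1) = ((w'.toFinset.card : Nat) : Int) := by
        have hcardmid : (w ++ [c]).toFinset.card = w'.toFinset.card + (if c2 ∈ w' then 0 else 1) := by
          rw [hconsmid]; exact pvCard_cons c2 w'
        by_cases hmem : c2 ∈ w'
        · have hne : v - 1 ≠ 0 := by
            have := List.count_pos_iff.mpr hmem
            omega
          rw [if_neg hne, hdiff1, hcardmid, if_pos hmem]; push_cast; ring
        · have he : v - 1 = 0 := by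
            have := List.count_eq_zero.mpr hmem
            omega
          rw [if_pos he, hdiff1, hcardmid, if_neg hmem]; push_cast; ring
      set diff2 := if v - 1 = 0 then diff1 - 1 else diff1 with hdiff2def
      -- record step equals recStepA (j ≥ K - 1 here)
      have hK1 : (K' : Int) - 1 ≤ (j : Int) := by omega
      have hslice1 : PySem.List.slice s (some ((j : Int) - (K' : Int) + 1)) (some ((j : Int) + 1)) = w' := by
        rw [PySem.List.slice_toNat s (by omega) (by omega), hw', List.drop_take]
        have h1 : ((j : Int) + 1).toNat - ((j : Int) - (K' : Int) + 1).toNat = (j + 1) - (j + 1 - K') := by omega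
        have h2 : ((j : Int) - (K' : Int) + 1).toNat = j + 1 - K' := by omega
        rw [h1, h2]
      have hcond : ((K' : Int) - 1 ≤ (j : Int) ∧ diff2 = (K' : Int)) ↔
          (PySem.Set.len (PySem.Set.ofList
            (PySem.List.slice s (some ((j : Int) - (K' : Int) + 1)) (some ((j : Int) + 1)))) = (K' : Int)) := by
        rw [hslice1, pvSetLen_eq_card, hdiff2]
        constructor
        · rintro ⟨_, h⟩; exact h
        · intro h; exact ⟨hK1, h⟩
      have hrecs : (if (K' : Int) - 1 ≤ (j : Int) ∧ diff2 = (K' : Int) then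
            PySem.Set.add recs (PySem.List.slice s (some ((j : Int) - (K' : Int))) (some ((j : Int) + 1)))
          else recs) = recStepA s (K' : Int) recs (j : Int) := by
        unfold recStepA
        rcases Classical.em ((K' : Int) - 1 ≤ (j : Int) ∧ diff2 = (K' : Int)) with h | h
        · rw [if_pos h, if_pos (hcond.mp h)]
        · rw [if_neg h, if_neg (fun hb => h (hcond.mpr hb))]
      -- invariants at j + 1 and the induction hypothesis
      have hcast1 : (j : Int) + 1 = ((j + 1 : Nat) : Int) := by push_cast; ring
      obtain ⟨cnt', diff', hrun⟩ := ih (j + 1) (by omega) (by omega)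
        (cnt1.insert c2 (v - 1)) diff2 (recStepA s (K' : Int) recs (j : Int))
        (by intro ch; rw [hcnt2 ch, hw']) (by rw [hdiff2, hw'])
      refine ⟨cnt', diff', ?_⟩
      simp only [KSubstringLoopA, hget]
      rw [← hcnt1def, ← hdiff1def, if_pos hK, hgetr]
      dsimp only
      rw [hv]
      dsimp only
      rw [← hdiff2def, hrecs, hcast1, hrun]
      -- fold side: max (K-1) j = j, peel one element
      rw [max_eq_right hK1, PySem.List.pyRange_one_cons hjn', List.foldl_cons, hcast1,
        max_eq_right (by omega : (K' : Int) - 1 ≤ ((j + 1 : Nat) : Int))]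
    · -- no removal: j < K
      have hKj : j < K' := by exact_mod_cast not_le.mp hK
      have hdropeq : (s.take (j + 1)).drop (j + 1 - K') = w ++ [c] := by
        rw [← hmid]
        congr 1
        omega
      have hcast1 : (j : Int) + 1 = ((j + 1 : Nat) : Int) := by push_cast; ring
      by_cases hK1 : (K' : Int) - 1 ≤ (j : Int)
      · -- j = K' - 1: the first full window
        have hjK1 : j + 1 = K' := by omega
        have hslice1 : PySem.List.slice s (some ((j : Int) - (K' : Int) + 1)) (some ((j : Int) + 1)) = w ++ [c] := by
          rw [PySem.List.slice_toNat s (by omega) (by omega), ← hdropeq, List.drop_take]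
          have h1 : ((j : Int) + 1).toNat - ((j : Int) - (K' : Int) + 1).toNat = (j + 1) - (j + 1 - K') := by omega
          have h2 : ((j : Int) - (K' : Int) + 1).toNat = j + 1 - K' := by omega
          rw [h1, h2]
        have hcond : ((K' : Int) - 1 ≤ (j : Int) ∧ diff1 = (K' : Int)) ↔
            (PySem.Set.len (PySem.Set.ofList
              (PySem.List.slice s (some ((j : Int) - (K' : Int) + 1)) (some ((j : Int) + 1)))) = (K' : Int)) := by
          rw [hslice1, pvSetLen_eq_card, hdiff1]
          constructor
          · rintro ⟨_, h⟩; exact h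
          · intro h; exact ⟨hK1, h⟩
        have hrecs : (if (K' : Int) - 1 ≤ (j : Int) ∧ diff1 = (K' : Int) then
              PySem.Set.add recs (PySem.List.slice s (some ((j : Int) - (K' : Int))) (some ((j : Int) + 1)))
            else recs) = recStepA s (K' : Int) recs (j : Int) := by
          unfold recStepA
          rcases Classical.em ((K' : Int) - 1 ≤ (j : Int) ∧ diff1 = (K' : Int)) with h | h
          · rw [if_pos h, if_pos (hcond.mp h)]
          · rw [if_neg h, if_neg (fun hb => h (hcond.mpr hb))]
        obtain ⟨cnt', diff', hrun⟩ := ih (j + 1) (by omega) (by omega)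
          cnt1 diff1 (recStepA s (K' : Int) recs (j : Int))
          (by intro ch; rw [hcnt1 ch, hdropeq]) (by rw [hdiff1, hdropeq])
        refine ⟨cnt', diff', ?_⟩
        simp only [KSubstringLoopA, hget]
        rw [← hcnt1def, ← hdiff1def, if_neg hK]
        dsimp only
        rw [hrecs, hcast1, hrun]
        rw [max_eq_right hK1, PySem.List.pyRange_one_cons hjn', List.foldl_cons, hcast1,
          max_eq_right (by omega : (K' : Int) - 1 ≤ ((j + 1 : Nat) : Int))]
      · -- j < K' - 1: no record possible, the fold's range has not started
        have hnorec : ¬ ((K' : Int) - 1 ≤ (j : Int) ∧ diff1 = (K' : Int)) := fun h => hK1 h.1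
        obtain ⟨cnt', diff', hrun⟩ := ih (j + 1) (by omega) (by omega)
          cnt1 diff1 recs
          (by intro ch; rw [hcnt1 ch, hdropeq]) (by rw [hdiff1, hdropeq])
        refine ⟨cnt', diff', ?_⟩
        simp only [KSubstringLoopA, hget]
        rw [← hcnt1def, ← hdiff1def, if_neg hK]
        dsimp only
        rw [if_neg hnorec, hcast1, hrun]
        rw [max_eq_left (by omega : ((j + 1 : Nat) : Int) ≤ (K' : Int) - 1),
          max_eq_left (by omega : ((j : Int)) ≤ (K' : Int) - 1)]

-- a list whose distinct count equals its length has no duplicates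
lemma pvNodup_of_card (l : List Char) (h : l.toFinset.card = l.length) : l.Nodup := by
  have hc : Multiset.card (l : Multiset Char) = l.length := by simp
  rw [List.toFinset, ← hc, Multiset.toFinset_card_eq_card_iff_nodup] at h
  exact h

-- main loop invariant for B: with last = last-occurrence map of s.take j and sm the least
-- start of a repeat-free suffix of s.take j, B's loop over the remaining enumerate entries
-- produces exactly the recStepA fold over the indices ≥ max (K-1) j (A's record fold).
lemma pvLoopB_eq (s : List Char) (K' : Nat) :
    ∀ (d j : Nat), s.length - j = d → j ≤ s.length →
    ∀ (last : PySem.Dict Char Int) (sm : Int) (recs : PySem.Set (List Char)),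
    (0 ≤ sm ∧ sm.toNat ≤ j) →
    ((s.take j).drop sm.toNat).Nodup →
    (∀ t : Nat, t < sm.toNat → ¬ ((s.take j).drop t).Nodup) →
    (∀ c : Char, (match last.get? c with
        | none => c ∉ s.take j
        | some v => 0 ≤ v ∧ v.toNat < j ∧ s[v.toNat]? = some c ∧ c ∉ (s.take j).drop (v.toNat + 1))) →
    ∃ last' sm',
      KSubstringLoopB s (K' : Int) (PySem.List.enumerate (s.drop j) (j : Int)) (last, sm, recs)
        = (last', sm',
            (PySem.List.pyRange (max ((K' : Int) - 1) (j : Int)) (s.length : Int)).foldl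
              (recStepA s (K' : Int)) recs) := by
  intro d
  induction d with
  | zero =>
    intro j hd hj last sm recs hS1 hS2 hS3 hL
    have hjn : j = s.length := by omega
    subst hjn
    rw [List.drop_length, PySem.List.enumerate_nil,
      PySem.List.pyRange_one_eq_nil (le_max_right _ _)]
    exact ⟨last, sm, rfl⟩
  | succ e ih =>
    intro j hd hj last sm recs hS1 hS2 hS3 hL
    have hjn : j < s.length := by omega
    set c := s[j] with hc
    -- prefix extension: dropping t ≤ j from s.take (j+1) appends c
    have hpre : ∀ t : Nat, t ≤ j → (s.take (j + 1)).drop t = (s.take j).drop t ++ [c] := by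
      intro t ht
      rw [List.take_add_one, List.getElem?_eq_getElem hjn]
      rw [List.drop_append_of_le_length (by simp; omega)]
      simp [hc]
    -- the updated minimal start
    set sm1 : Int := (match last.get? c with
      | some v => if v + 1 > sm then v + 1 else sm
      | none => sm) with hsm1
    have htake : s.take (j + 1) = s.take j ++ [c] := by
      have h0 := hpre 0 (Nat.zero_le _)
      simpa using h0
    -- arithmetic facts about sm1
    have hsm1ge : sm ≤ sm1 := by
      rcases hv : last.get? c with _ | v
      · have h : sm1 = sm := by rw [hsm1, hv]
        omega
      · rw [hsm1, hv]
        dsimp only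
        split_ifs with h <;> omega
    have hS1' : 0 ≤ sm1 ∧ sm1.toNat ≤ j + 1 := by
      rcases hv : last.get? c with _ | v
      · rw [hsm1, hv]
        dsimp only
        exact ⟨hS1.1, by omega⟩
      · have hLc := hL c
        rw [hv] at hLc
        obtain ⟨hv0, hvj, -, -⟩ := hLc
        rw [hsm1, hv]
        dsimp only
        split_ifs with h
        · constructor <;> omega
        · exact ⟨hS1.1, by omega⟩
    have hsm1c : ∀ v : Int, last.get? c = some v → v + 1 ≤ sm1 := by
      intro v hv
      rw [hsm1, hv]
      dsimp only
      split_ifs with h <;> omega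
    have hsm1j : sm1.toNat ≤ j := by
      rcases hv : last.get? c with _ | v
      · have h : sm1 = sm := by rw [hsm1, hv]
        omega
      · have hLc := hL c
        rw [hv] at hLc
        obtain ⟨hv0, hvj, -, -⟩ := hLc
        have hub : sm1 = sm ∨ sm1 = v + 1 := by
          rw [hsm1, hv]
          dsimp only
          split_ifs with h
          · right
            rfl
          · left
            rfl
        rcases hub with h | h <;> omega
    -- updated invariants
    have hS2' : ((s.take (j + 1)).drop sm1.toNat).Nodup := by
      rw [hpre sm1.toNat hsm1j]
      have hdropnd : ((s.take j).drop sm1.toNat).Nodup := by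
        have he : (s.take j).drop sm1.toNat = ((s.take j).drop sm.toNat).drop (sm1.toNat - sm.toNat) := by
          rw [List.drop_drop]
          congr 1
          omega
        rw [he]
        exact hS2.sublist (List.drop_sublist _ _)
      have hnotmem : c ∉ (s.take j).drop sm1.toNat := by
        rcases hv : last.get? c with _ | v
        · have hnc := hL c
          rw [hv] at hnc
          exact fun hm => hnc ((List.drop_sublist _ _).mem hm)
        · have hLc := hL c
          rw [hv] at hLc
          obtain ⟨hv0, hvj, -, hnc⟩ := hLc
          have hge : v.toNat + 1 ≤ sm1.toNat := by
            have := hsm1c v hv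
            omega
          intro hm
          apply hnc
          have he : (s.take j).drop sm1.toNat = ((s.take j).drop (v.toNat + 1)).drop (sm1.toNat - (v.toNat + 1)) := by
            rw [List.drop_drop]
            congr 1
            omega
          rw [he] at hm
          exact (List.drop_sublist _ _).mem hm
      rw [← List.concat_eq_append, List.nodup_concat]
      exact ⟨hnotmem, hdropnd⟩
    have hS3' : ∀ t : Nat, t < sm1.toNat → ¬ ((s.take (j + 1)).drop t).Nodup := by
      intro t ht
      rw [hpre t (by omega)]
      by_cases htsm : t < sm.toNat
      · intro hnd
        exact hS3 t htsm (hnd.sublist (List.sublist_append_left _ _))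
      · rcases hv : last.get? c with _ | v
        · exfalso
          have h : sm1 = sm := by rw [hsm1, hv]
          omega
        · have hLc := hL c
          rw [hv] at hLc
          obtain ⟨hv0, hvj, hgv, -⟩ := hLc
          have hub : sm1 = sm ∨ sm1 = v + 1 := by
            rw [hsm1, hv]
            dsimp only
            split_ifs with h
            · right
              rfl
            · left
              rfl
          have htv : t ≤ v.toNat := by
            rcases hub with h | h <;> omega
          have hmem : c ∈ (s.take j).drop t := by
            have hg : ((s.take j).drop t)[v.toNat - t]? = some c := by
              rw [List.getElem?_drop]
              have he2 : t + (v.toNat - t) = v.toNat := by omega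
              rw [he2, List.getElem?_take_of_lt hvj]
              exact hgv
            exact List.mem_of_getElem? hg
          intro hnd
          rw [← List.concat_eq_append, List.nodup_concat] at hnd
          exact hnd.1 hmem
    have hL' : ∀ c' : Char, (match (last.insert c (j : Int)).get? c' with
        | none => c' ∉ s.take (j + 1)
        | some v => 0 ≤ v ∧ v.toNat < j + 1 ∧ s[v.toNat]? = some c' ∧
            c' ∉ (s.take (j + 1)).drop (v.toNat + 1)) := by
      intro c'
      rcases eq_or_ne c' c with rfl | hne
      · rw [PySem.Dict.get?_insert_self]
        dsimp only
        have hjt : ((j : Int)).toNat = j := Int.toNat_natCast j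
        refine ⟨by omega, by omega, ?_, ?_⟩
        · rw [hjt, List.getElem?_eq_getElem hjn, hc]
        · rw [hjt, List.drop_eq_nil_of_le (by simp : (s.take (j + 1)).length ≤ j + 1)]
          simp
      · rw [PySem.Dict.get?_insert_of_ne last ((j : Int)) hne]
        have hLc := hL c'
        rcases hv : last.get? c' with _ | v
        · rw [hv] at hLc
          dsimp only
          intro hm
          rw [htake] at hm
          simp only [List.mem_append, List.mem_singleton] at hm
          rcases hm with hm | hm
          · exact hLc hm
          · exact hne hm
        · rw [hv] at hLc
          dsimp only
          obtain ⟨hv0, hvj, hgv, hnc⟩ := hLc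
          refine ⟨hv0, by omega, hgv, ?_⟩
          rw [hpre (v.toNat + 1) (by omega)]
          intro hm
          simp only [List.mem_append, List.mem_singleton] at hm
          rcases hm with hm | hm
          · exact hnc hm
          · exact hne hm
    -- unfold one step of B's loop
    rw [List.drop_eq_getElem_cons hjn, ← hc, PySem.List.enumerate_cons]
    have hcast1 : (j : Int) + 1 = ((j + 1 : Nat) : Int) := by push_cast; ring
    simp only [KSubstringLoopB, ← hsm1]
    by_cases hK1 : (K' : Int) - 1 ≤ (j : Int)
    · -- a full window ends at j: B's test agrees with recStepA's distinctness test
      have hKj1 : K' ≤ j + 1 := by omega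
      set W := (s.take (j + 1)).drop (j + 1 - K') with hW
      have hsliceW : PySem.List.slice s (some ((j : Int) - (K' : Int) + 1)) (some ((j : Int) + 1)) = W := by
        rw [PySem.List.slice_toNat s (by omega) (by omega), hW, List.drop_take]
        have h1 : ((j : Int) + 1).toNat - ((j : Int) - (K' : Int) + 1).toNat = (j + 1) - (j + 1 - K') := by omega
        have h2 : ((j : Int) - (K' : Int) + 1).toNat = j + 1 - K' := by omega
        rw [h1, h2]
      have hWlen : W.length = K' := by
        rw [hW]
        simp [List.length_drop, List.length_take]
        omega
      have hdir1 : sm1 ≤ (j : Int) - (K' : Int) + 1 → W.Nodup := by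
        intro h
        have hle : sm1.toNat ≤ j + 1 - K' := by omega
        have : W = ((s.take (j + 1)).drop sm1.toNat).drop ((j + 1 - K') - sm1.toNat) := by
          rw [hW, List.drop_drop]
          congr 1
          omega
        rw [this]
        exact hS2'.sublist (List.drop_sublist _ _)
      have hdir2 : W.Nodup → sm1 ≤ (j : Int) - (K' : Int) + 1 := by
        intro h
        by_contra hgt
        have : j + 1 - K' < sm1.toNat := by omega
        exact hS3' (j + 1 - K') this (by rw [← hW] at *; exact h)
      have hcond : ((K' : Int) - 1 ≤ (j : Int) ∧ sm1 ≤ (j : Int) - (K' : Int) + 1) ↔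
          (PySem.Set.len (PySem.Set.ofList
            (PySem.List.slice s (some ((j : Int) - (K' : Int) + 1)) (some ((j : Int) + 1)))) = (K' : Int)) := by
        rw [hsliceW, pvSetLen_eq_card]
        constructor
        · rintro ⟨-, h⟩
          have := hdir1 h
          rw [List.toFinset_card_of_nodup this, hWlen]
        · intro h
          refine ⟨hK1, hdir2 (pvNodup_of_card W ?_)⟩
          rw [hWlen]
          exact_mod_cast h
      have hrecs : (if (K' : Int) - 1 ≤ (j : Int) ∧ sm1 ≤ (j : Int) - (K' : Int) + 1 then
            PySem.Set.add recs (PySem.List.slice s (some ((j : Int) - (K' : Int))) (some ((j : Int) + 1)))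
          else recs) = recStepA s (K' : Int) recs (j : Int) := by
        unfold recStepA
        rcases Classical.em ((K' : Int) - 1 ≤ (j : Int) ∧ sm1 ≤ (j : Int) - (K' : Int) + 1) with h | h
        · rw [if_pos h, if_pos (hcond.mp h)]
        · rw [if_neg h, if_neg (fun hb => h (hcond.mpr hb))]
      obtain ⟨last', sm', hrun⟩ := ih (j + 1) (by omega) (by omega)
        (last.insert c (j : Int)) sm1 (recStepA s (K' : Int) recs (j : Int))
        hS1' hS2' hS3' hL'
      refine ⟨last', sm', ?_⟩
      rw [hrecs, hcast1, hrun]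
      have hjn' : ((j : Int)) < (s.length : Int) := by exact_mod_cast hjn
      rw [max_eq_right hK1, PySem.List.pyRange_one_cons hjn', List.foldl_cons, hcast1,
        max_eq_right (by omega : (K' : Int) - 1 ≤ ((j + 1 : Nat) : Int))]
    · -- j < K' - 1: no full window yet, the record fold has not started
      have hnorec : ¬ ((K' : Int) - 1 ≤ (j : Int) ∧ sm1 ≤ (j : Int) - (K' : Int) + 1) :=
        fun h => hK1 h.1
      obtain ⟨last', sm', hrun⟩ := ih (j + 1) (by omega) (by omega)
        (last.insert c (j : Int)) sm1 recs hS1' hS2' hS3' hL'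
      refine ⟨last', sm', ?_⟩
      rw [if_neg hnorec, hcast1, hrun]
      rw [max_eq_left (by omega : ((j + 1 : Nat) : Int) ≤ (K' : Int) - 1),
        max_eq_left (by omega : ((j : Int)) ≤ (K' : Int) - 1)]

-- ===== VERDICT (by name: the statement is the Claim_ definition above) =====
theorem KSubstring_spec : Claim_equal_KSubstring := by
  intro st K hDom hPre
  unfold Spec_KSubstring
  rcases hPre with hK | hnil
  · -- 0 ≤ K: both loops build the same record fold
    obtain ⟨K', rfl⟩ : ∃ K' : Nat, K = (K' : Int) := ⟨K.toNat, (Int.toNat_of_nonneg hK).symm⟩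
    obtain ⟨cnt', diff', hrunA⟩ := pvLoopA_eq st.toList K' (st.toList.length) 0 rfl
      (Nat.zero_le _) PySem.Dict.empty 0 PySem.Set.empty
      (by intro ch; simp [PySem.Dict.getD_empty])
      (by simp)
    obtain ⟨last', sm', hrunB⟩ := pvLoopB_eq st.toList K' (st.toList.length) 0 rfl
      (Nat.zero_le _) PySem.Dict.empty 0 PySem.Set.empty
      (by constructor <;> simp)
      (by simp)
      (by intro t ht; simp at ht)
      (by intro c; rw [PySem.Dict.get?_empty]; simp)
    unfold KSubstring KSubstring_alt
    rw [PySem.Str.len_eq]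
    push_cast at hrunA hrunB ⊢
    rw [List.drop_zero] at hrunB
    rw [hrunA, hrunB]
  · -- empty string: both loops are empty
    unfold KSubstring KSubstring_alt
    rw [PySem.Str.len_eq, hnil]
    rw [PySem.List.pyRange_one_eq_nil (by simp)]
    simp [KSubstringLoopA, KSubstringLoopB, PySem.List.enumerate_nil]
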